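-- pv_equiv track=rewrite | github.com/ellieko/algorithms | top100/easy/27_RemoveElement.py | removeElement_v3
-- ===== SOURCE A (Python) =====
-- def removeElement_v3(nums, val: int) -> int:
--     n = len(nums)
--     i = 0
--     while i < n:
--         if nums[i] == val:
--             nums.pop(i)
--             n -= 1
--         else:
--             i += 1
--     return n
-- ===== SOURCE B (Python) =====
-- def removeElement_v3(nums, val: int) -> int:
--     nums[:] = [x for x in nums if x != val]
--     return len(nums)
-- ===== Notes on version B (the rewrite author's own statement) =====
-- stated objective: simpler
-- what changed: Replaces the index-tracking while-loop that pops matching elements one at a time with a single-pass list-comprehension filter assigned back in place, returning its length.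
import Mathlib
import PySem

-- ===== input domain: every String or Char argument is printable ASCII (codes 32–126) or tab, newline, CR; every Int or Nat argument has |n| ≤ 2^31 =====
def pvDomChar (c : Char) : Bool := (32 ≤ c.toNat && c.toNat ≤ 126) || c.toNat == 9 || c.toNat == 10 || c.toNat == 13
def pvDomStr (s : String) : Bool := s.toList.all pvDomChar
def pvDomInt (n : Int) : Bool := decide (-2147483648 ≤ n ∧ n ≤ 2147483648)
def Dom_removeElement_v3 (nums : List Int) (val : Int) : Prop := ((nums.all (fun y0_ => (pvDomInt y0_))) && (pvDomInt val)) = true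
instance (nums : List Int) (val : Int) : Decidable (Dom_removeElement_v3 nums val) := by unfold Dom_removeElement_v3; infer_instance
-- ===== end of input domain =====

-- B replaces A's index-tracking pop loop by a single-pass filter (simpler); A mutates
-- nums in place and B performs the equivalent in-place replacement; the equivalence
-- proved here is about the RETURN value (the new length).


-- ===== PORT A =====
-- the while loop: state is (nums, n, i); nums.pop(i) → PySem.List.pop?
def pvLoopA (val : Int) (nums : List Int) (n i : Int) : Int :=
  if i < n then
    match PySem.List.pyGet? nums i with
    | some x =>
      if x = val then
        match PySem.List.pop? nums i with
        | some r => pvLoopA val r.2 (n - 1) i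
        | none => n      -- unreachable guard (i is in range when i < n = len)
      else pvLoopA val nums n (i + 1)
    | none => n          -- unreachable guard
  else n
termination_by (n - i).toNat
decreasing_by all_goals omega

def removeElement_v3 (nums : List Int) (val : Int) : Int :=
  pvLoopA val nums (nums.length : Int) 0

-- ===== PORT B =====
-- nums[:] = [x for x in nums if x != val]; return len(nums)
def removeElement_v3_alt (nums : List Int) (val : Int) : Int :=
  ((nums.filter (fun x => x != val)).length : Int)

-- ===== PRECONDITION & SPEC =====
def Spec_removeElement_v3 (nums : List Int) (val : Int) (out : Int) : Prop := out = removeElement_v3_alt nums val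
instance (nums : List Int) (val : Int) (out : Int) : Decidable (Spec_removeElement_v3 nums val out) := by unfold Spec_removeElement_v3; infer_instance

-- ===== CLAIM (what is proved, stated in full; the proofs are below) =====
def Claim_equal_removeElement_v3 : Prop := ∀ (nums : List Int) (val : Int), Dom_removeElement_v3 nums val → Spec_removeElement_v3 nums val (removeElement_v3 nums val)

-- ===== LEMMAS AND PROOFS =====
lemma pvLoopA_spec (val : Int) (k : Nat) :
    ∀ (nums : List Int) (i : Nat), nums.length - i = k → i ≤ nums.length →
      pvLoopA val nums (nums.length : Int) (i : Int)
        = (i : Int) + (((nums.drop i).filter (fun x => x != val)).length : Int) := by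
  induction k with
  | zero =>
    intro nums i hk hle
    have hi : i = nums.length := by omega
    rw [pvLoopA]
    simp [hi]
  | succ k ih =>
    intro nums i hk hle
    have hi : i < nums.length := by omega
    rw [pvLoopA]
    rw [if_pos (by exact_mod_cast hi)]
    rw [PySem.List.pyGet?_natCast, List.getElem?_eq_getElem hi]
    dsimp only
    by_cases hv : nums[i] = val
    · rw [if_pos hv, PySem.List.pop?_natCast (h := hi)]
      have hlen : (nums.eraseIdx i).length = nums.length - 1 := by
        simp [List.length_eraseIdx, hi]
      have hih := ih (nums.eraseIdx i) i (by omega) (by omega)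
      have hcast : (nums.length : Int) - 1 = ((nums.eraseIdx i).length : Int) := by
        rw [hlen]; omega
      dsimp only
      rw [hcast, hih]
      have hdropE : (nums.eraseIdx i).drop i = nums.drop (i + 1) := by
        rw [List.eraseIdx_eq_take_drop_succ, List.drop_append]
        simp [Nat.le_of_lt hi]
      have hdrop : nums.drop i = nums[i] :: nums.drop (i + 1) :=
        List.drop_eq_getElem_cons hi
      rw [hdropE, hdrop, List.filter_cons]
      simp [hv]
    · rw [if_neg hv]
      have hih := ih nums (i + 1) (by omega) (by omega)
      have : ((i : Int) + 1) = ((i + 1 : Nat) : Int) := by push_cast; ring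
      rw [this, hih]
      have hdrop : nums.drop i = nums[i] :: nums.drop (i + 1) :=
        List.drop_eq_getElem_cons hi
      rw [hdrop, List.filter_cons]
      have : (nums[i] != val) = true := by simp [hv]
      rw [this]
      push_cast
      simp
      ring

-- ===== VERDICT (by name: the statement is the Claim_ definition above) =====
theorem removeElement_v3_spec : Claim_equal_removeElement_v3 := by
  intro nums val _
  unfold Spec_removeElement_v3 removeElement_v3 removeElement_v3_alt
  have h := pvLoopA_spec val nums.length nums 0 (by omega) (by omega)
  simpa using h
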